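-- pv_equiv track=rewrite | github.com/gigamonster256/nix-config | hosts/extreme-switch/generate-config.py | expand_ports
-- ===== SOURCE A (Python) =====
-- def expand_ports(ports: list[int]) -> str:
--     """Convert a sorted list of port numbers to ranges string.
--     [1, 2, 3, 5, 7, 8, 9] -> "1-3,5,7-9"
--     """
--     if not ports:
--         return ""
--     ports = sorted(ports)
--     ranges = []
--     start = ports[0]
--     end = ports[0]
--     for p in ports[1:]:
--         if p == end + 1:
--             end = p
--         else:
--             ranges.append(f"{start}-{end}" if start != end else str(start))
--             start = end = p
--     ranges.append(f"{start}-{end}" if start != end else str(start))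
--     return ",".join(ranges)
-- ===== SOURCE B (Python) =====
-- from itertools import groupby
--
--
-- def expand_ports(ports: list[int]) -> str:
--     """Convert a sorted list of port numbers to ranges string.
--     [1, 2, 3, 5, 7, 8, 9] -> "1-3,5,7-9"
--     """
--     if not ports:
--         return ""
--     ports = sorted(ports)
--     parts = []
--     for _, grp in groupby(enumerate(ports), key=lambda pair: pair[1] - pair[0]):
--         vals = [v for _, v in grp]
--         if len(vals) == 1:
--             parts.append(str(vals[0]))
--         else:
--             parts.append(f"{vals[0]}-{vals[-1]}")
--     return ",".join(parts)
-- ===== Notes on version B (the rewrite author's own statement) =====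
-- stated objective: idiomatic
-- what changed: Replaces A's explicit start/end accumulator loop with itertools.groupby over enumerate(ports), grouping maximal consecutive runs by the constant value-minus-index key and formatting each group.
import Mathlib
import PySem

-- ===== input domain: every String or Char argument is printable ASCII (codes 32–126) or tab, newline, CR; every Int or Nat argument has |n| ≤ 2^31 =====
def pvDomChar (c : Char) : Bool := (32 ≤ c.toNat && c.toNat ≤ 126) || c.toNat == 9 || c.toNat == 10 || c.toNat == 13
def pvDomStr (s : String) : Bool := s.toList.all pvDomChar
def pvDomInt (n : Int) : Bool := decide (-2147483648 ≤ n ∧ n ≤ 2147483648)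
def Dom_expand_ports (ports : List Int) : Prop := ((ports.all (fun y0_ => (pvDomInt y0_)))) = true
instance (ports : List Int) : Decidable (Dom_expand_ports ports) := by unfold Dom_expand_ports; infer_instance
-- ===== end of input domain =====

-- B replaces A's start/end accumulator loop by grouping maximal consecutive runs
-- (itertools.groupby on enumerate with key value-minus-index); objective: idiomatic.


-- ===== PORT A =====
-- f"{start}-{end}" if start != end else str(start)   (exact: str(n) is PySem.Int.toChars)
def aFmt (s e : Int) : List Char :=
  if s ≠ e then PySem.Int.toChars s ++ ['-'] ++ PySem.Int.toChars e else PySem.Int.toChars s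

-- A's loop body: state (start, end, ranges)
def aStep (acc : Int × Int × List (List Char)) (p : Int) : Int × Int × List (List Char) :=
  let (start, e, ranges) := acc
  if p = e + 1 then (start, p, ranges)
  else (p, p, ranges ++ [aFmt start e])

def expand_ports (ports : List Int) : String :=
  if ports.isEmpty then "" else
  let ps := PySem.List.sorted ports (fun x => x) false
  let p0 := PySem.List.pyGetD ps 0 0          -- ports[0] (ps nonempty, default unused)
  let acc := (PySem.List.slice ps (some 1) none).foldl aStep (p0, p0, ([] : List (List Char)))
  String.ofList (PySem.Chars.join [','] (acc.2.2 ++ [aFmt acc.1 acc.2.1]))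

-- ===== PORT B =====
-- hand port of itertools.groupby specialized to key = (fun pair => pair.2 - pair.1):
-- bGroupRun k t = the maximal prefix of t with key k, and the remainder (exact)
def bGroupRun (k : Int) : List (Int × Int) → List (Int × Int) × List (Int × Int)
  | [] => ([], [])
  | p :: t =>
    if p.2 - p.1 = k then
      let (g, r) := bGroupRun k t
      (p :: g, r)
    else ([], p :: t)

theorem bGroupRun_snd_length (k : Int) (t : List (Int × Int)) :
    (bGroupRun k t).2.length ≤ t.length := by
  induction t with
  | nil => simp [bGroupRun]
  | cons p t ih =>
    simp only [bGroupRun]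
    split
    · exact le_trans ih (Nat.le_succ _)
    · simp

def bGroupBy : List (Int × Int) → List (List (Int × Int))
  | [] => []
  | p :: t =>
    let gr := bGroupRun (p.2 - p.1) t
    (p :: gr.1) :: bGroupBy gr.2
termination_by l => l.length
decreasing_by
  simp only [List.length_cons]
  exact Nat.lt_succ_of_le (bGroupRun_snd_length _ t)

-- str(vals[0]) if len(vals) == 1 else f"{vals[0]}-{vals[-1]}"
def bFmt (vals : List Int) : List Char :=
  if vals.length = 1 then PySem.Int.toChars (PySem.List.pyGetD vals 0 0)
  else PySem.Int.toChars (PySem.List.pyGetD vals 0 0) ++ ['-'] ++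
       PySem.Int.toChars (PySem.List.pyGetD vals (-1) 0)

def expand_ports_alt (ports : List Int) : String :=
  if ports.isEmpty then "" else
  let ps := PySem.List.sorted ports (fun x => x) false
  let parts := (bGroupBy (PySem.List.enumerate ps 0)).map (fun g => bFmt (g.map (·.2)))
  String.ofList (PySem.Chars.join [','] parts)

-- ===== PRECONDITION & SPEC =====
def Spec_expand_ports (ports : List Int) (out : String) : Prop := out = expand_ports_alt ports
instance (ports : List Int) (out : String) : Decidable (Spec_expand_ports ports out) := by unfold Spec_expand_ports; infer_instance

-- ===== CLAIM (what is proved, stated in full; the proofs are below) =====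
def Claim_equal_expand_ports : Prop := ∀ (ports : List Int), Dom_expand_ports ports → Spec_expand_ports ports (expand_ports ports)

-- ===== LEMMAS AND PROOFS =====

-- maximal consecutive chain continuing e: the run values and the remainder
def chainSplit : Int → List Int → List Int × List Int
  | _, [] => ([], [])
  | e, p :: t =>
    if p = e + 1 then
      let (g, r) := chainSplit p t
      (p :: g, r)
    else ([], p :: t)

theorem chainSplit_snd_length (e : Int) (t : List Int) :
    (chainSplit e t).2.length ≤ t.length := by
  induction t generalizing e with
  | nil => simp [chainSplit]
  | cons p t ih =>
    simp only [chainSplit]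
    split
    · exact le_trans (ih p) (Nat.le_succ _)
    · simp

theorem chainSplit_fst_lt (e : Int) (t : List Int) :
    ∀ x ∈ (chainSplit e t).1, e < x := by
  induction t generalizing e with
  | nil => simp [chainSplit]
  | cons p t ih =>
    simp only [chainSplit]
    split
    · rename_i hp
      intro x hx
      simp only [List.mem_cons] at hx
      rcases hx with rfl | hx
      · omega
      · have := ih p x hx; omega
    · simp

-- the run decomposition both programs realize, rendered with A's formatter
def fmtRuns (start e : Int) (rest : List Int) : List (List Char) :=
  match _h : chainSplit e rest with
  | (g, []) => [aFmt start (g.getLastD e)]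
  | (g, p :: r') => aFmt start (g.getLastD e) :: fmtRuns p p r'
termination_by rest.length
decreasing_by
  have := chainSplit_snd_length e rest
  rw [_h] at this
  simp at this
  omega

theorem fmtRuns_eq (start e : Int) (rest g r : List Int) (hc : chainSplit e rest = (g, r)) :
    fmtRuns start e rest = match r with
      | [] => [aFmt start (g.getLastD e)]
      | p :: r' => aFmt start (g.getLastD e) :: fmtRuns p p r' := by
  rw [fmtRuns]
  split <;> rename_i h' <;> rw [hc] at h' <;> cases h' <;> rfl

-- A's loop (plus the trailing append) computes fmtRuns
theorem foldlA_eq_fmtRuns (rest : List Int) :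
    ∀ (start e : Int) (ranges : List (List Char)),
    (rest.foldl aStep (start, e, ranges)).2.2
      ++ [aFmt (rest.foldl aStep (start, e, ranges)).1 (rest.foldl aStep (start, e, ranges)).2.1]
      = ranges ++ fmtRuns start e rest := by
  induction rest with
  | nil =>
    intro start e ranges
    rw [fmtRuns_eq start e [] [] [] rfl]
    simp
  | cons p t ih =>
    intro start e ranges
    by_cases hp : p = e + 1
    · subst hp
      simp only [List.foldl_cons, aStep, reduceIte]
      rw [ih]
      congr 1
      rcases hc : chainSplit (e + 1) t with ⟨g, r⟩
      rw [fmtRuns_eq start (e + 1) t g r hc,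
        fmtRuns_eq start e ((e + 1) :: t) ((e + 1) :: g) r (by simp [chainSplit, hc])]
      cases r <;> simp [List.getLast?_cons]
    · simp only [List.foldl_cons, aStep, if_neg hp]
      rw [ih]
      rw [fmtRuns_eq start e (p :: t) [] (p :: t) (by simp [chainSplit, hp])]
      simp

-- groupby over the enumeration follows chainSplit (key p.2 - p.1 is constant on a run)
theorem bGroupRun_enumerate (t : List Int) :
    ∀ (i e : Int),
    bGroupRun (e - i) (PySem.List.enumerate t (i + 1))
      = ((PySem.List.enumerate (chainSplit e t).1 (i + 1)),
         (PySem.List.enumerate (chainSplit e t).2 (i + 1 + (chainSplit e t).1.length))) := by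
  induction t with
  | nil => intro i e; simp [chainSplit, PySem.List.enumerate, bGroupRun]
  | cons p t ih =>
    intro i e
    rw [PySem.List.enumerate_cons]
    by_cases hp : p = e + 1
    · have hk : p - (i + 1) = e - i := by omega
      simp only [bGroupRun, hk, reduceIte, chainSplit, if_pos hp]
      have := ih (i + 1) p
      rw [hk] at this
      rw [this]
      rcases hc : chainSplit p t with ⟨g, r⟩
      simp only [PySem.List.enumerate_cons, List.length_cons, Prod.mk.injEq, true_and]
      congr 1
      push_cast
      ring
    · have hk : ¬ (p - (i + 1) = e - i) := by omega
      simp only [bGroupRun, if_neg hk, chainSplit, if_neg hp]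
      simp [PySem.List.enumerate_cons]

theorem pyGetD_last_cons (p : Int) (g : List Int) (d : Int) :
    PySem.List.pyGetD (p :: g) (-1) d = g.getLastD p := by
  rw [PySem.List.pyGetD_neg_one (p :: g) d (by simp)]
  cases g with
  | nil => simp
  | cons q g => simp [List.getLast_cons, List.getLastD_eq_getLast?, List.getLast?_eq_some_getLast]

-- one run: B's formatter agrees with A's (run values all exceed the start)
theorem bFmt_run (s : Int) (g : List Int) (hg : ∀ x ∈ g, s < x) :
    bFmt (s :: g) = aFmt s (g.getLastD s) := by
  cases g with
  | nil => simp [bFmt, aFmt]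
  | cons q g =>
    have hmem : List.getLastD g q ∈ q :: g := List.getLastD_mem_cons
    have hlt := hg _ hmem
    simp only [bFmt, aFmt, List.length_cons, List.getLastD_cons, pyGetD_last_cons,
      PySem.List.pyGetD_zero_cons]
    rw [if_neg (by omega), if_pos (by omega)]

-- B's grouped parts compute fmtRuns as well
theorem groupBy_parts_eq_fmtRuns (rest : List Int) :
    ∀ (s i : Int),
    (bGroupBy (PySem.List.enumerate (s :: rest) i)).map (fun g => bFmt (g.map (·.2)))
      = fmtRuns s s rest := by
  induction hn : rest.length using Nat.strong_induction_on generalizing rest with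
  | _ n ih =>
    intro s i
    subst hn
    rw [PySem.List.enumerate_cons, bGroupBy]
    have hs : (i, s).2 - (i, s).1 = s - i := rfl
    rw [hs, bGroupRun_enumerate rest i s]
    rcases hc : chainSplit s rest with ⟨g, r⟩
    have hlt : ∀ x ∈ g, s < x := by
      intro x hx; exact chainSplit_fst_lt s rest x (by rw [hc]; exact hx)
    have hlast : bFmt (s :: (PySem.List.enumerate g (i + 1)).map (·.2))
        = aFmt s (g.getLastD s) := by
      rw [PySem.List.map_snd_enumerate]
      exact bFmt_run s g hlt
    rw [fmtRuns_eq s s rest g r hc]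
    cases r with
    | nil =>
      simp only [PySem.List.enumerate_nil, bGroupBy, List.map_cons, List.map_nil]
      rw [hlast]
    | cons q r' =>
      have hlen : r'.length < rest.length := by
        have := chainSplit_snd_length s rest
        rw [hc] at this; simp at this; omega
      have ihr := ih r'.length hlen r' rfl q (i + 1 + (g.length : Int))
      rw [List.map_cons, ihr, List.map_cons, hlast]

theorem sorted_ne_nil {ports : List Int} (h : ports ≠ []) :
    PySem.List.sorted ports (fun x => x) false ≠ [] := by
  intro hnil
  have := PySem.List.sorted_perm ports (fun x => x) false
  rw [hnil] at this
  exact h (List.Perm.nil_eq this).symm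

-- ===== VERDICT (by name: the statement is the Claim_ definition above) =====
theorem expand_ports_spec : Claim_equal_expand_ports := by
  intro ports _
  unfold Spec_expand_ports
  by_cases hne : ports.isEmpty
  · simp [expand_ports, expand_ports_alt, hne]
  · rcases hsp : PySem.List.sorted ports (fun x => x) false with _ | ⟨p, rest⟩
    · exact absurd hsp (sorted_ne_nil (by simpa [List.isEmpty_iff] using hne))
    simp only [expand_ports, expand_ports_alt, if_neg hne, hsp]
    rw [PySem.List.pyGetD_zero_cons]
    rw [show PySem.List.slice (p :: rest) (some 1) none = rest from by
      simpa using PySem.List.slice_from_natCast (xs := p :: rest) (a := 1)]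
    rw [groupBy_parts_eq_fmtRuns rest p 0]
    have hA := foldlA_eq_fmtRuns rest p p []
    simp only [List.nil_append] at hA
    rw [← hA]
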